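-- pv_equiv track=rewrite | github.com/Danny18-ops/hackmatch-app | backend/scraper/devpost.py | detect_field
-- ===== SOURCE A (Python) =====
-- def detect_field(tags: list, title: str) -> str:
--     """Detect field from tags and title"""
--     text = ' '.join(tags + [title]).lower()
--
--     if any(w in text for w in ['ai', 'ml', 'machine learning', 'deep learning', 'llm', 'gpt', 'neural', 'chatbot']):
--         return 'AI/ML'
--     elif any(w in text for w in ['blockchain', 'web3', 'crypto', 'ethereum', 'solana', 'defi', 'nft']):
--         return 'Web3'
--     elif any(w in text for w in ['security', 'cyber', 'hack', 'ctf', 'privacy', 'infosec']):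
--         return 'Cybersecurity'
--     elif any(w in text for w in ['mobile', 'ios', 'android', 'swift', 'flutter', 'kotlin']):
--         return 'Mobile'
--     elif any(w in text for w in ['react', 'frontend', 'web', 'javascript', 'css', 'html', 'nextjs']):
--         return 'Web Development'
--     elif any(w in text for w in ['social', 'health', 'education', 'environment', 'impact', 'good']):
--         return 'Social Impact'
--     else:
--         return 'General Tech'
-- ===== SOURCE B (Python) =====
-- LABELS = ['AI/ML', 'Web3', 'Cybersecurity', 'Mobile', 'Web Development',
--           'Social Impact', 'General Tech']
--
-- # every keyword, flat, tagged with its category's priority rank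
-- KEYWORD_RANKS = (
--     [(w, 0) for w in ['ai', 'ml', 'machine learning', 'deep learning', 'llm', 'gpt', 'neural', 'chatbot']]
--     + [(w, 1) for w in ['blockchain', 'web3', 'crypto', 'ethereum', 'solana', 'defi', 'nft']]
--     + [(w, 2) for w in ['security', 'cyber', 'hack', 'ctf', 'privacy', 'infosec']]
--     + [(w, 3) for w in ['mobile', 'ios', 'android', 'swift', 'flutter', 'kotlin']]
--     + [(w, 4) for w in ['react', 'frontend', 'web', 'javascript', 'css', 'html', 'nextjs']]
--     + [(w, 5) for w in ['social', 'health', 'education', 'environment', 'impact', 'good']]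
-- )
--
-- # index the keywords by their first character, built once
-- FIRST_CHAR = {}
-- for w, r in KEYWORD_RANKS:
--     FIRST_CHAR.setdefault(w[0], []).append((w, r))
--
-- def detect_field(tags: list, title: str) -> str:
--     """Detect field from tags and title"""
--     text = ' '.join(tags + [title]).lower()
--     # single left-to-right scan of the text: at each position try only the keywords
--     # starting with that character and keep the best (lowest) rank seen; stop once
--     # rank 0 is reached, since no keyword can beat it
--     best = 6
--     for i in range(len(text)):
--         if best == 0:
--             break
--         for word, rank in FIRST_CHAR.get(text[i], ()):
--             if rank < best and text.startswith(word, i):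
--                 best = rank
--     return LABELS[best]
-- ===== Notes on version B (the rewrite author's own statement) =====
-- stated objective: alternative
-- what changed: Instead of A's ordered per-category 'keyword in text' substring searches with early return, B makes one left-to-right scan over the positions of the text, trying at each position only the keywords in a first-character index and keeping the minimum priority rank seen (stopping once rank 0 is reached), then indexes a label list by that rank.
import Mathlib
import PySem

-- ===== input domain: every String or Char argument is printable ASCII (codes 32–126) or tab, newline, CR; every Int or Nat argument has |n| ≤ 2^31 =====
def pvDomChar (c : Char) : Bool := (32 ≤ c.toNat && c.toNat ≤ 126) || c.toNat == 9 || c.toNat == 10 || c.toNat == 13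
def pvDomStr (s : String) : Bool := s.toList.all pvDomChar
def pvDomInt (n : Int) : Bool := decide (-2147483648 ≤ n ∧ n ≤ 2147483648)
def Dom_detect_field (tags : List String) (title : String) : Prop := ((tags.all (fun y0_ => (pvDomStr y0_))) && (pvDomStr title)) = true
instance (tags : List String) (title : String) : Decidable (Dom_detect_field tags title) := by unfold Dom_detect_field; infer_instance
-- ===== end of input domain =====

-- B replaces A's ordered per-category substring searches by one left-to-right scan of the text that,
-- via a first-character index of a flat (keyword, rank) table, keeps the minimum priority rank of any
-- keyword starting at each position (alternative algorithm, same cost class).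


-- ===== PORT A =====
def detect_field (tags : List String) (title : String) : String :=
  let text := PySem.Str.lower (PySem.Str.join " " (tags ++ [title]))
  if (["ai", "ml", "machine learning", "deep learning", "llm", "gpt", "neural", "chatbot"].any (fun w => PySem.Str.isIn w text)) then "AI/ML"
  else if (["blockchain", "web3", "crypto", "ethereum", "solana", "defi", "nft"].any (fun w => PySem.Str.isIn w text)) then "Web3"
  else if (["security", "cyber", "hack", "ctf", "privacy", "infosec"].any (fun w => PySem.Str.isIn w text)) then "Cybersecurity"
  else if (["mobile", "ios", "android", "swift", "flutter", "kotlin"].any (fun w => PySem.Str.isIn w text)) then "Mobile"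
  else if (["react", "frontend", "web", "javascript", "css", "html", "nextjs"].any (fun w => PySem.Str.isIn w text)) then "Web Development"
  else if (["social", "health", "education", "environment", "impact", "good"].any (fun w => PySem.Str.isIn w text)) then "Social Impact"
  else "General Tech"

-- ===== PORT B =====
def pvLabels : List String :=
  ["AI/ML", "Web3", "Cybersecurity", "Mobile", "Web Development", "Social Impact", "General Tech"]

-- Source B's KEYWORD_RANKS: every keyword, flat, tagged with its category's priority rank
def pvKeywordRanks : List (String × Nat) :=
  (["ai", "ml", "machine learning", "deep learning", "llm", "gpt", "neural", "chatbot"].map (fun w => (w, 0)))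
  ++ (["blockchain", "web3", "crypto", "ethereum", "solana", "defi", "nft"].map (fun w => (w, 1)))
  ++ (["security", "cyber", "hack", "ctf", "privacy", "infosec"].map (fun w => (w, 2)))
  ++ (["mobile", "ios", "android", "swift", "flutter", "kotlin"].map (fun w => (w, 3)))
  ++ (["react", "frontend", "web", "javascript", "css", "html", "nextjs"].map (fun w => (w, 4)))
  ++ (["social", "health", "education", "environment", "impact", "good"].map (fun w => (w, 5)))

-- Source B's FIRST_CHAR: the keywords grouped by first character (w[0] is exact: every keyword is nonempty)
def pvKwIndex : PySem.Dict Char (List (String × Nat)) :=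
  (pvKeywordRanks.map (fun p => (p.1.toList.headD ' ', p))).foldl
    (fun d q => d.modify q.1 [] (· ++ [q.2])) PySem.Dict.empty

-- inner loop of Source B: 'for word, rank in FIRST_CHAR.get(text[i], ()): if rank < best and text.startswith(word, i): best = rank'
-- text[i] with 0 ≤ i < len(text) is exactly cs.getD i; text.startswith(word, i) is startswith on the char list dropped by i
def kwInner (cs : List Char) (i : Nat) (b : Nat) : Nat :=
  (pvKwIndex.getD (cs.getD i ' ') []).foldl
    (fun b p => if p.2 < b ∧ PySem.Chars.startswith (cs.drop i) p.1.toList = true then p.2 else b) b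

-- outer loop of Source B: 'for i in range(len(text)): if best == 0: break …'
def kwLoop (cs : List Char) : List Nat → Nat → Nat
  | [], best => best
  | i :: rest, best => if best = 0 then best else kwLoop cs rest (kwInner cs i best)

def kwScan (cs : List Char) : Nat := kwLoop cs (List.range cs.length) 6

def detect_field_alt (tags : List String) (title : String) : String :=
  let text := PySem.Str.lower (PySem.Str.join " " (tags ++ [title]))
  let best := kwScan text.toList
  -- best ≤ 6 always, so LABELS[best] never raises
  pvLabels.getD best "General Tech"

-- ===== PRECONDITION & SPEC =====
def Spec_detect_field (tags : List String) (title : String) (out : String) : Prop := out = detect_field_alt tags title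
instance (tags : List String) (title : String) (out : String) : Decidable (Spec_detect_field tags title out) := by unfold Spec_detect_field; infer_instance

-- ===== CLAIM (what is proved, stated in full; the proofs are below) =====
def Claim_equal_detect_field : Prop := ∀ (tags : List String) (title : String), Dom_detect_field tags title → Spec_detect_field tags title (detect_field tags title)

-- ===== LEMMAS AND PROOFS =====

-- rank r is matched iff some keyword of rank r starts at some position of cs
def kwMatched (cs : List Char) (r : Nat) : Prop :=
  ∃ i ∈ List.range cs.length, ∃ p ∈ pvKeywordRanks,
    p.2 = r ∧ PySem.Chars.startswith (cs.drop i) p.1.toList = true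

lemma kw_nonempty : ∀ p ∈ pvKeywordRanks, p.1.toList ≠ [] := by decide

lemma group_mem (c : Char) (p : String × Nat) :
    p ∈ pvKwIndex.getD c [] ↔ p ∈ pvKeywordRanks ∧ p.1.toList.headD ' ' = c := by
  unfold pvKwIndex
  rw [PySem.Dict.getD_foldl_modify_append]
  constructor
  · intro h
    rw [PySem.Dict.getD_empty, List.nil_append] at h
    obtain ⟨q, hq, rfl⟩ := List.mem_map.mp h
    obtain ⟨hq1, hq2⟩ := List.mem_filter.mp hq
    obtain ⟨r, hr, rfl⟩ := List.mem_map.mp hq1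
    exact ⟨hr, by simpa using hq2⟩
  · rintro ⟨hp, hc⟩
    rw [PySem.Dict.getD_empty, List.nil_append]
    exact List.mem_map.mpr ⟨(p.1.toList.headD ' ', p),
      List.mem_filter.mpr ⟨List.mem_map.mpr ⟨p, hp, rfl⟩, by simpa using hc⟩, rfl⟩

lemma group_sub (c : Char) (p : String × Nat) (h : p ∈ pvKwIndex.getD c []) :
    p ∈ pvKeywordRanks := ((group_mem c p).mp h).1

-- a keyword matching at position i starts with the character at position i
lemma mem_group_of_startswith (cs : List Char) (i : Nat)
    (p : String × Nat) (hp : p ∈ pvKeywordRanks)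
    (hsw : PySem.Chars.startswith (cs.drop i) p.1.toList = true) :
    p ∈ pvKwIndex.getD (cs.getD i ' ') [] := by
  rw [group_mem]
  refine ⟨hp, ?_⟩
  obtain ⟨wc, wt, hw⟩ := List.exists_cons_of_ne_nil (kw_nonempty p hp)
  have hpre := (PySem.Chars.startswith_iff _ _).mp hsw
  rw [hw] at hpre
  obtain ⟨t, ht⟩ := hpre
  have hhead : (cs.drop i).head? = some wc := by rw [← ht]; rfl
  rw [List.head?_drop] at hhead
  have : cs.getD i ' ' = wc := by
    rw [List.getD_eq_getElem?_getD, hhead]; rfl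
  rw [hw, this]; rfl

lemma innerFold_le (cs : List Char) (i : Nat) (L : List (String × Nat)) (b : Nat) :
    L.foldl (fun b p => if p.2 < b ∧ PySem.Chars.startswith (cs.drop i) p.1.toList = true then p.2 else b) b ≤ b := by
  induction L generalizing b with
  | nil => simp
  | cons p L ih =>
      simp only [List.foldl_cons]
      split_ifs with h
      · exact le_trans (ih _) (le_of_lt h.1)
      · exact ih b

lemma innerFold_cases (cs : List Char) (i : Nat) (L : List (String × Nat)) (b : Nat) :
    L.foldl (fun b p => if p.2 < b ∧ PySem.Chars.startswith (cs.drop i) p.1.toList = true then p.2 else b) b = b ∨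
    ∃ p ∈ L, PySem.Chars.startswith (cs.drop i) p.1.toList = true ∧
      L.foldl (fun b p => if p.2 < b ∧ PySem.Chars.startswith (cs.drop i) p.1.toList = true then p.2 else b) b = p.2 := by
  induction L generalizing b with
  | nil => left; simp
  | cons p L ih =>
      simp only [List.foldl_cons]
      split_ifs with h
      · rcases ih p.2 with h' | ⟨q, hq, hsw, h'⟩
        · exact Or.inr ⟨p, List.mem_cons_self .., h.2, h'⟩
        · exact Or.inr ⟨q, List.mem_cons_of_mem _ hq, hsw, h'⟩
      · rcases ih b with h' | ⟨q, hq, hsw, h'⟩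
        · exact Or.inl h'
        · exact Or.inr ⟨q, List.mem_cons_of_mem _ hq, hsw, h'⟩

lemma innerFold_le_of_mem (cs : List Char) (i : Nat) (L : List (String × Nat)) (b : Nat)
    (p : String × Nat) (hp : p ∈ L) (hsw : PySem.Chars.startswith (cs.drop i) p.1.toList = true) :
    L.foldl (fun b p => if p.2 < b ∧ PySem.Chars.startswith (cs.drop i) p.1.toList = true then p.2 else b) b ≤ p.2 := by
  induction L generalizing b with
  | nil => cases hp
  | cons q L ih =>
      simp only [List.foldl_cons]
      rcases List.mem_cons.mp hp with rfl | hp'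
      · split_ifs with h
        · exact innerFold_le cs i L _
        · have : b ≤ p.2 := by
            by_contra hb
            exact h ⟨by omega, hsw⟩
          exact le_trans (innerFold_le cs i L b) this
      · split_ifs with h
        · exact ih _ hp'
        · exact ih b hp'

lemma kwLoop_le (cs : List Char) (J : List Nat) (b : Nat) :
    kwLoop cs J b ≤ b := by
  induction J generalizing b with
  | nil => simp [kwLoop]
  | cons i J ih =>
      simp only [kwLoop]
      split_ifs with h
      · exact le_refl b
      · exact le_trans (ih _) (innerFold_le cs i _ b)

lemma kwLoop_cases (cs : List Char) (J : List Nat) (b : Nat) :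
    kwLoop cs J b = b ∨
    ∃ i ∈ J, ∃ p ∈ pvKeywordRanks, PySem.Chars.startswith (cs.drop i) p.1.toList = true ∧
      kwLoop cs J b = p.2 := by
  induction J generalizing b with
  | nil => left; simp [kwLoop]
  | cons i J ih =>
      simp only [kwLoop]
      split_ifs with h
      · left; rfl
      · rcases ih (kwInner cs i b) with h' | ⟨j, hj, p, hp, hsw, h'⟩
        · rcases innerFold_cases cs i (pvKwIndex.getD (cs.getD i ' ') []) b with h'' | ⟨p, hp, hsw, h''⟩
          · left; rw [h', kwInner]; exact h''
          · right
            exact ⟨i, List.mem_cons_self .., p, group_sub _ p hp, hsw, by rw [h', kwInner]; exact h''⟩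
        · exact Or.inr ⟨j, List.mem_cons_of_mem _ hj, p, hp, hsw, h'⟩

lemma kwLoop_le_of (cs : List Char) (J : List Nat) (b : Nat)
    (i : Nat) (hi : i ∈ J) (p : String × Nat) (hp : p ∈ pvKeywordRanks)
    (hsw : PySem.Chars.startswith (cs.drop i) p.1.toList = true) :
    kwLoop cs J b ≤ p.2 := by
  induction J generalizing b with
  | nil => cases hi
  | cons j J ih =>
      simp only [kwLoop]
      split_ifs with h
      · omega
      · rcases List.mem_cons.mp hi with rfl | hi'
        · refine le_trans (kwLoop_le cs J _) ?_
          exact innerFold_le_of_mem cs i _ b p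
            (mem_group_of_startswith cs i p hp hsw) hsw
        · exact ih _ hi'

lemma kwScan_cases (cs : List Char) : kwScan cs = 6 ∨ kwMatched cs (kwScan cs) := by
  rcases kwLoop_cases cs (List.range cs.length) 6 with h | ⟨i, hi, p, hp, hsw, h⟩
  · exact Or.inl h
  · right
    exact ⟨i, hi, p, hp, h.symm, hsw⟩

lemma kwScan_le (cs : List Char) (r : Nat) (h : kwMatched cs r) : kwScan cs ≤ r := by
  obtain ⟨i, hi, p, hp, hr, hsw⟩ := h
  exact hr ▸ kwLoop_le_of cs _ 6 i hi p hp hsw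

-- a nonempty keyword starts at some position below the length iff it is a substring
lemma kw_occurs (cs w : List Char) (hw : w ≠ []) :
    (∃ i ∈ List.range cs.length, PySem.Chars.startswith (cs.drop i) w = true) ↔
      PySem.Chars.isIn w cs = true := by
  rw [← PySem.Chars.exists_prefix_drop_iff_isIn]
  constructor
  · rintro ⟨i, _, h⟩
    exact ⟨i, (PySem.Chars.startswith_iff _ _).mp h⟩
  · rintro ⟨j, hj⟩
    by_cases hle : j < cs.length
    · exact ⟨j, List.mem_range.mpr hle, (PySem.Chars.startswith_iff _ _).mpr hj⟩
    · exfalso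
      rw [List.drop_eq_nil_of_le (by omega)] at hj
      exact hw (List.prefix_nil.mp hj)

lemma kwMatched_iff_any (cs : List Char) (r : Nat) :
    kwMatched cs r ↔
      (pvKeywordRanks.any (fun p => p.2 == r && PySem.Chars.isIn p.1.toList cs)) = true := by
  rw [List.any_eq_true]
  constructor
  · rintro ⟨i, hi, p, hp, hr, hsw⟩
    refine ⟨p, hp, ?_⟩
    simp only [Bool.and_eq_true, beq_iff_eq]
    exact ⟨hr, (kw_occurs cs p.1.toList (kw_nonempty p hp)).mp ⟨i, hi, hsw⟩⟩
  · rintro ⟨p, hp, h⟩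
    simp only [Bool.and_eq_true, beq_iff_eq] at h
    obtain ⟨i, hi, hsw⟩ := (kw_occurs cs p.1.toList (kw_nonempty p hp)).mpr h.2
    exact ⟨i, hi, p, hp, h.1, hsw⟩

-- bridge: kwMatched at rank 0 is exactly A's per-category 'any' test
lemma kwMatched_iff_hit0 (text : String) :
    kwMatched text.toList 0 ↔
      (["ai", "ml", "machine learning", "deep learning", "llm", "gpt", "neural", "chatbot"].any (fun w => PySem.Str.isIn w text)) = true := by
  rw [kwMatched_iff_any]
  simp [pvKeywordRanks, PySem.Str.isIn]

-- bridge: kwMatched at rank 1 is exactly A's per-category 'any' test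
lemma kwMatched_iff_hit1 (text : String) :
    kwMatched text.toList 1 ↔
      (["blockchain", "web3", "crypto", "ethereum", "solana", "defi", "nft"].any (fun w => PySem.Str.isIn w text)) = true := by
  rw [kwMatched_iff_any]
  simp [pvKeywordRanks, PySem.Str.isIn]

-- bridge: kwMatched at rank 2 is exactly A's per-category 'any' test
lemma kwMatched_iff_hit2 (text : String) :
    kwMatched text.toList 2 ↔
      (["security", "cyber", "hack", "ctf", "privacy", "infosec"].any (fun w => PySem.Str.isIn w text)) = true := by
  rw [kwMatched_iff_any]
  simp [pvKeywordRanks, PySem.Str.isIn]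

-- bridge: kwMatched at rank 3 is exactly A's per-category 'any' test
lemma kwMatched_iff_hit3 (text : String) :
    kwMatched text.toList 3 ↔
      (["mobile", "ios", "android", "swift", "flutter", "kotlin"].any (fun w => PySem.Str.isIn w text)) = true := by
  rw [kwMatched_iff_any]
  simp [pvKeywordRanks, PySem.Str.isIn]

-- bridge: kwMatched at rank 4 is exactly A's per-category 'any' test
lemma kwMatched_iff_hit4 (text : String) :
    kwMatched text.toList 4 ↔
      (["react", "frontend", "web", "javascript", "css", "html", "nextjs"].any (fun w => PySem.Str.isIn w text)) = true := by
  rw [kwMatched_iff_any]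
  simp [pvKeywordRanks, PySem.Str.isIn]

-- bridge: kwMatched at rank 5 is exactly A's per-category 'any' test
lemma kwMatched_iff_hit5 (text : String) :
    kwMatched text.toList 5 ↔
      (["social", "health", "education", "environment", "impact", "good"].any (fun w => PySem.Str.isIn w text)) = true := by
  rw [kwMatched_iff_any]
  simp [pvKeywordRanks, PySem.Str.isIn]

lemma kwMatched_le (cs : List Char) (r : Nat) (h : kwMatched cs r) : r ≤ 5 := by
  obtain ⟨i, _, p, hp, hr, _⟩ := h
  have hall : ∀ q ∈ pvKeywordRanks, q.2 ≤ 5 := by decide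
  have := hall p hp
  omega

-- ===== VERDICT (by name: the statement is the Claim_ definition above) =====
theorem detect_field_spec : Claim_equal_detect_field := by
  intro tags title _
  unfold Spec_detect_field detect_field detect_field_alt
  simp only []
  set text := PySem.Str.lower (PySem.Str.join " " (tags ++ [title])) with htext
  split_ifs with h0 h1 h2 h3 h4 h5
  · have hm := (kwMatched_iff_hit0 text).mpr h0
    have hle := kwScan_le text.toList 0 hm
    rcases kwScan_cases text.toList with h6 | hmm
    · omega
    · set r := kwScan text.toList with hr
      interval_cases r
      · rfl
  · have hm := (kwMatched_iff_hit1 text).mpr h1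
    have hle := kwScan_le text.toList 1 hm
    rcases kwScan_cases text.toList with h6 | hmm
    · omega
    · set r := kwScan text.toList with hr
      interval_cases r
      · exact absurd ((kwMatched_iff_hit0 text).mp hmm) h0
      · rfl
  · have hm := (kwMatched_iff_hit2 text).mpr h2
    have hle := kwScan_le text.toList 2 hm
    rcases kwScan_cases text.toList with h6 | hmm
    · omega
    · set r := kwScan text.toList with hr
      interval_cases r
      · exact absurd ((kwMatched_iff_hit0 text).mp hmm) h0
      · exact absurd ((kwMatched_iff_hit1 text).mp hmm) h1
      · rfl
  · have hm := (kwMatched_iff_hit3 text).mpr h3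
    have hle := kwScan_le text.toList 3 hm
    rcases kwScan_cases text.toList with h6 | hmm
    · omega
    · set r := kwScan text.toList with hr
      interval_cases r
      · exact absurd ((kwMatched_iff_hit0 text).mp hmm) h0
      · exact absurd ((kwMatched_iff_hit1 text).mp hmm) h1
      · exact absurd ((kwMatched_iff_hit2 text).mp hmm) h2
      · rfl
  · have hm := (kwMatched_iff_hit4 text).mpr h4
    have hle := kwScan_le text.toList 4 hm
    rcases kwScan_cases text.toList with h6 | hmm
    · omega
    · set r := kwScan text.toList with hr
      interval_cases r
      · exact absurd ((kwMatched_iff_hit0 text).mp hmm) h0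
      · exact absurd ((kwMatched_iff_hit1 text).mp hmm) h1
      · exact absurd ((kwMatched_iff_hit2 text).mp hmm) h2
      · exact absurd ((kwMatched_iff_hit3 text).mp hmm) h3
      · rfl
  · have hm := (kwMatched_iff_hit5 text).mpr h5
    have hle := kwScan_le text.toList 5 hm
    rcases kwScan_cases text.toList with h6 | hmm
    · omega
    · set r := kwScan text.toList with hr
      interval_cases r
      · exact absurd ((kwMatched_iff_hit0 text).mp hmm) h0
      · exact absurd ((kwMatched_iff_hit1 text).mp hmm) h1
      · exact absurd ((kwMatched_iff_hit2 text).mp hmm) h2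
      · exact absurd ((kwMatched_iff_hit3 text).mp hmm) h3
      · exact absurd ((kwMatched_iff_hit4 text).mp hmm) h4
      · rfl
  · rcases kwScan_cases text.toList with h6 | hmm
    · rw [h6]; rfl
    · have hle := kwMatched_le text.toList (kwScan text.toList) hmm
      set r := kwScan text.toList with hr
      interval_cases r
      · exact absurd ((kwMatched_iff_hit0 text).mp hmm) h0
      · exact absurd ((kwMatched_iff_hit1 text).mp hmm) h1
      · exact absurd ((kwMatched_iff_hit2 text).mp hmm) h2
      · exact absurd ((kwMatched_iff_hit3 text).mp hmm) h3
      · exact absurd ((kwMatched_iff_hit4 text).mp hmm) h4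
      · exact absurd ((kwMatched_iff_hit5 text).mp hmm) h5
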